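-- pv_equiv track=rewrite | github.com/rickjmzmnz/Lector-Partidas-PGN | src/Principal.py | ajustaCadena
-- ===== SOURCE A (Python) =====
-- def ajustaCadena(cadena):
--     nueva = ""
--     partida = cadena.split()
--     inicio = 0
--     fin = 15
--     for i in range(0,len(partida),15):
--         intervalo = partida[inicio:fin]
--         for j in range(len(intervalo)):
--             nueva = nueva + intervalo[j] + " "
--         nueva = nueva + "\n"
--         inicio = fin
--         fin = fin + 15
--     return nueva
-- ===== SOURCE B (Python) =====
-- def ajustaCadena(cadena):
--     nueva = ""
--     partida = cadena.split()
--     for i, tok in enumerate(partida):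
--         nueva += tok + " "
--         if i % 15 == 14:
--             nueva += "\n"
--     if len(partida) % 15 != 0:
--         nueva += "\n"
--     return nueva
-- ===== Notes on version B (the rewrite author's own statement) =====
-- stated objective: simpler
-- what changed: Replaced A's outer chunk loop with slice bookkeeping (inicio/fin) plus an inner index loop by a single flat enumerate pass over the split tokens with a modulo-15 counter and one final conditional newline.
import Mathlib
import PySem

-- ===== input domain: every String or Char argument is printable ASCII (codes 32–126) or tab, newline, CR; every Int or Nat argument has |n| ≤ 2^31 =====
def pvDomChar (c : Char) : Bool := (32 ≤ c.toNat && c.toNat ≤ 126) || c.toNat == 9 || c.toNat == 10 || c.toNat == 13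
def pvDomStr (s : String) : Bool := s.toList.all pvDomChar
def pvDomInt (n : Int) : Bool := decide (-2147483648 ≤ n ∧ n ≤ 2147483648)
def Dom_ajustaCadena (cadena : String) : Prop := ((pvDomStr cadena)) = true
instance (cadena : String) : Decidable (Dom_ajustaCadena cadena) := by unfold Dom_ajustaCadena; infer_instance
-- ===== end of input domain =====

-- B replaces A's chunk loop (slice + inner index loop) by one flat enumerate pass with a
-- modulo-15 counter; objective: simpler (same linear traversal, no slicing bookkeeping).

-- ===== PORT A =====
def ajustaCadena (cadena : String) : String :=
  let nueva : String := ""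
  let partida := PySem.Str.split₀ cadena
  let inicio : Int := 0
  let fin : Int := 15
  let st := (PySem.List.pyRange 0 (PySem.List.len partida) 15).foldl
    (fun (st : String × Int × Int) _i =>
      let intervalo := PySem.List.slice partida (some st.2.1) (some st.2.2)
      let nueva := (PySem.List.pyRange 0 (PySem.List.len intervalo) 1).foldl
        (fun acc j => acc ++ PySem.List.pyGetD intervalo j "" ++ " ") st.1
      (nueva ++ "\n", st.2.2, st.2.2 + 15))
    (nueva, inicio, fin)
  st.1

-- ===== PORT B =====
def ajustaCadena_alt (cadena : String) : String :=
  let partida := PySem.Str.split₀ cadena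
  let nueva := (PySem.List.enumerate partida).foldl
    (fun (nueva : String) p =>
      let nueva := nueva ++ p.2 ++ " "
      if PySem.Int.mod p.1 15 == 14 then nueva ++ "\n" else nueva) ""
  if PySem.Int.mod (PySem.List.len partida) 15 != 0 then nueva ++ "\n" else nueva

-- ===== PRECONDITION & SPEC =====
def Spec_ajustaCadena (cadena : String) (out : String) : Prop := out = ajustaCadena_alt cadena
instance (cadena : String) (out : String) : Decidable (Spec_ajustaCadena cadena out) := by unfold Spec_ajustaCadena; infer_instance

-- ===== CLAIM (what is proved, stated in full; the proofs are below) =====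
def Claim_equal_ajustaCadena : Prop := ∀ (cadena : String), Dom_ajustaCadena cadena → Spec_ajustaCadena cadena (ajustaCadena cadena)

-- ===== LEMMAS AND PROOFS =====

def lineStr (s : String) (c : List String) : String :=
  c.foldl (fun a t => a ++ t ++ " ") s

def chunkStr (ts : List String) (s : String) : String :=
  if ts = [] then s else chunkStr (ts.drop 15) (lineStr s (ts.take 15) ++ "\n")
termination_by ts.length
decreasing_by
  rename_i h
  have : ts.length ≠ 0 := fun h0 => h (List.eq_nil_of_length_eq_zero h0)
  simp [List.length_drop]; omega

lemma pyRange_pos_cons (a b s : Int) (hs : 0 < s) (h : a < b) :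
    PySem.List.pyRange a b s = a :: PySem.List.pyRange (a + s) b s := by
  rw [PySem.List.pyRange_of_pos _ _ hs, PySem.List.pyRange_of_pos _ _ hs]
  have hn : b - a + s - 1 = (b - a - 1) + 1 * s := by ring
  by_cases h2 : a + s < b
  · have e1 : ((b - a + s - 1) / s) = (b - a - 1) / s + 1 := by
      rw [hn, Int.add_mul_ediv_right _ _ (by omega : s ≠ 0)]
    have e2 : b - (a + s) + s - 1 = b - a - 1 := by ring
    have hpos : 0 ≤ (b - a - 1) / s := Int.ediv_nonneg (by omega) (by omega)
    simp only [if_pos h, if_pos h2, e1, e2]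
    have : ((b - a - 1) / s + 1).toNat = ((b - a - 1) / s).toNat + 1 := by omega
    rw [this, List.range_succ_eq_map, List.map_cons, List.map_map]
    congr 1
    · simp
    · apply List.map_congr_left
      intro k _
      simp [Nat.succ_eq_add_one, Function.comp]
      push_cast
      ring
  · have e1 : ((b - a + s - 1) / s) = 1 := by
      rw [← PySem.Int.floordiv_eq_ediv_of_pos hs, PySem.Int.floordiv_eq_iff_of_pos hs]
      constructor <;> nlinarith
    simp [if_pos h, if_neg h2, e1]

lemma A_loop (partida : List String) (k : Nat) (s : String) :
    ((PySem.List.pyRange (15 * (k : Int)) (PySem.List.len partida) 15).foldl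
      (fun (st : String × Int × Int) _i =>
        let intervalo := PySem.List.slice partida (some st.2.1) (some st.2.2)
        let nueva := (PySem.List.pyRange 0 (PySem.List.len intervalo) 1).foldl
          (fun acc j => acc ++ PySem.List.pyGetD intervalo j "" ++ " ") st.1
        (nueva ++ "\n", st.2.2, st.2.2 + 15))
      (s, (15 * (k : Int)), (15 * (k : Int) + 15))).1
    = chunkStr (partida.drop (15 * k)) s := by
  by_cases h : partida.length ≤ 15 * k
  · have hr : PySem.List.pyRange (15 * (k : Int)) (PySem.List.len partida) 15 = [] := by
      rw [PySem.List.pyRange_of_pos _ _ (by norm_num)]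
      rw [if_neg (by simp [PySem.List.len]; push_cast; omega)]
      simp
    have hd : partida.drop (15 * k) = [] := List.drop_eq_nil_of_le h
    rw [hr, hd, chunkStr]
    simp
  · push_neg at h
    have hlt : (15 * (k : Int)) < PySem.List.len partida := by
      simp [PySem.List.len]; push_cast; omega
    set f := (fun (st : String × Int × Int) (_i : Int) =>
        let intervalo := PySem.List.slice partida (some st.2.1) (some st.2.2)
        let nueva := (PySem.List.pyRange 0 (PySem.List.len intervalo) 1).foldl
          (fun acc j => acc ++ PySem.List.pyGetD intervalo j "" ++ " ") st.1
        (nueva ++ "\n", st.2.2, st.2.2 + 15)) with hf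
    rw [pyRange_pos_cons _ _ _ (by norm_num) hlt, List.foldl_cons]
    have hslice : PySem.List.slice partida (some (15 * (k : Int))) (some (15 * (k : Int) + 15))
        = (partida.drop (15 * k)).take 15 := by
      have := PySem.List.slice_natCast_add partida (15 * k) 15
      push_cast at this ⊢
      exact this
    have hinner : ∀ (iv : List String) (s0 : String),
        (PySem.List.pyRange 0 (PySem.List.len iv) 1).foldl
          (fun acc j => acc ++ PySem.List.pyGetD iv j "" ++ " ") s0 = lineStr s0 iv := by
      intro iv s0
      have := PySem.List.foldl_pyRange_zero_pyGetD' iv "" (fun a t => a ++ t ++ " ") s0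
      simpa [PySem.List.len, lineStr] using this
    have hinit : f (s, (15 * (k : Int)), (15 * (k : Int) + 15)) (15 * (k : Int))
        = (lineStr s ((partida.drop (15 * k)).take 15) ++ "\n",
            15 * (k : Int) + 15, 15 * (k : Int) + 15 + 15) := by
      rw [hf]; simp only [hslice, hinner]
    rw [hinit]
    have hrec := A_loop partida (k + 1) (lineStr s ((partida.drop (15 * k)).take 15) ++ "\n")
    have hc : (15 * ((k : Nat) + 1 : Nat) : Int) = 15 * (k : Int) + 15 := by push_cast; ring
    rw [hc] at hrec
    have hdd : partida.drop (15 * (k + 1)) = (partida.drop (15 * k)).drop 15 := by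
      rw [List.drop_drop]; congr 1
    rw [hdd] at hrec
    rw [chunkStr, if_neg (by
      intro hnil
      have := congrArg List.length hnil
      simp [List.length_drop] at this
      omega)]
    exact hrec
termination_by partida.length - 15 * k
decreasing_by omega

lemma B_partial (c : List String) (j : Int) (s : String)
    (h0 : 0 ≤ j) (h : j % 15 + c.length ≤ 14) :
    (PySem.List.enumerate c j).foldl
      (fun (nueva : String) p =>
        let nueva := nueva ++ p.2 ++ " "
        if PySem.Int.mod p.1 15 == 14 then nueva ++ "\n" else nueva) s
    = lineStr s c := by
  induction c generalizing j s with
  | nil => simp [lineStr, PySem.List.enumerate]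
  | cons t c ih =>
    rw [PySem.List.enumerate_cons]
    have hm : j % 15 ≤ 13 := by simp at h; omega
    have hmod : PySem.Int.mod j 15 = j % 15 := PySem.Int.mod_eq_emod_of_pos (by omega)
    simp only [List.foldl_cons, hmod]
    rw [if_neg (by simp; omega)]
    rw [ih (j + 1) _ (by omega) (by simp at h ⊢; omega)]
    simp [lineStr]

lemma B_full (c : List String) (j : Int) (s : String)
    (h0 : 0 ≤ j) (hj : j % 15 = 0) (hc : c.length = 15) :
    (PySem.List.enumerate c j).foldl
      (fun (nueva : String) p =>
        let nueva := nueva ++ p.2 ++ " "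
        if PySem.Int.mod p.1 15 == 14 then nueva ++ "\n" else nueva) s
    = lineStr s c ++ "\n" := by
  rcases List.eq_nil_or_concat c with rfl | ⟨c', t, rfl⟩
  · simp at hc
  · have hc' : c'.length = 14 := by simp at hc; omega
    rw [List.concat_eq_append, PySem.List.enumerate_append, List.foldl_append]
    rw [B_partial c' j s h0 (by omega)]
    have hmod : PySem.Int.mod (j + (c'.length : Int)) 15 = 14 := by
      rw [PySem.Int.mod_eq_emod_of_pos (by omega)]
      rw [hc']; omega
    simp only [PySem.List.enumerate_cons, PySem.List.enumerate_nil, List.foldl_cons,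
      List.foldl_nil, hmod]
    rw [if_pos (by simp)]
    simp [lineStr]

lemma B_loop (ts : List String) (j : Int) (s : String)
    (h0 : 0 ≤ j) (hj : j % 15 = 0) :
    chunkStr ts s =
      (let F := (PySem.List.enumerate ts j).foldl
        (fun (nueva : String) p =>
          let nueva := nueva ++ p.2 ++ " "
          if PySem.Int.mod p.1 15 == 14 then nueva ++ "\n" else nueva) s
      if ts.length % 15 = 0 then F else F ++ "\n") := by
  by_cases hnil : ts = []
  · subst hnil; simp [chunkStr, PySem.List.enumerate]
  · have hne : ts.length ≠ 0 := fun h0 => hnil (List.eq_nil_of_length_eq_zero h0)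
    rw [chunkStr, if_neg hnil]
    by_cases h15 : ts.length < 15
    · have hd : ts.drop 15 = [] := List.drop_eq_nil_of_le (by omega)
      have htk : ts.take 15 = ts := List.take_of_length_le (by omega)
      have hF := B_partial ts j s h0 (by omega)
      rw [hd, htk]
      simp only [hF]
      rw [chunkStr, if_pos rfl, if_neg (by omega)]
    · push_neg at h15
      have hsplit : ts = ts.take 15 ++ ts.drop 15 := (List.take_append_drop 15 ts).symm
      have htk : (ts.take 15).length = 15 := by simp [List.length_take]; omega
      conv_rhs => rw [hsplit]
      rw [PySem.List.enumerate_append, List.foldl_append]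
      rw [B_full (ts.take 15) j s h0 hj htk, htk]
      have := B_loop (ts.drop 15) (j + 15) (lineStr s (ts.take 15) ++ "\n") (by omega) (by omega)
      rw [this]
      have hlen : (ts.drop 15).length % 15 = (ts.take 15 ++ ts.drop 15).length % 15 := by
        simp [List.length_drop]; omega
      simp only [hlen]
      norm_num
termination_by ts.length
decreasing_by simp [List.length_drop]; omega

-- ===== VERDICT (by name: the statement is the Claim_ definition above) =====
theorem ajustaCadena_spec : Claim_equal_ajustaCadena := by
  intro cadena _
  unfold Spec_ajustaCadena ajustaCadena ajustaCadena_alt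
  simp only [PySem.List.len_eq]
  have hA := A_loop (PySem.Str.split₀ cadena) 0 ""
  norm_num at hA
  rw [hA]
  have hB := B_loop (PySem.Str.split₀ cadena) 0 "" le_rfl (by norm_num)
  rw [hB]
  have hm : PySem.Int.mod ((PySem.Str.split₀ cadena).length : Int) 15
      = ((PySem.Str.split₀ cadena).length : Int) % 15 :=
    PySem.Int.mod_eq_emod_of_pos (by norm_num)
  rw [hm]
  by_cases h : (PySem.Str.split₀ cadena).length % 15 = 0
  · rw [if_pos h]
    rw [if_neg (by simp; omega)]
  · rw [if_neg h]
    rw [if_pos (by simp; omega)]
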